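-- pv_equiv track=rewrite | github.com/rmbryan71/euler | solvedProblems/p125.py | f
-- ===== SOURCE A (Python) =====
-- import math, itertools, time
--
-- def f(x):  # all numbers less than x that are sums of consecutive squares
--     results = []
--     max = math.floor(math.sqrt(x))
--     for i in range(1, max): # lower bound of sequence
--         for j in range(i+2, max):
--             z = sum(y*y for y in range(i, j))
--             if 1 < z < x and z not in results:
--                 results.append(z)
--     return sorted(results)
-- ===== SOURCE B (Python) =====
-- import math
--
-- def f(x):  # all numbers less than x that are sums of consecutive squares
--     m = math.isqrt(x)
--     seen = set()
--     for i in range(1, m):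
--         z = i * i + (i + 1) * (i + 1)   # sum of squares from i to j-1, maintained incrementally
--         for j in range(i + 2, m):
--             if 1 < z < x:
--                 seen.add(z)
--             z += j * j
--     return sorted(seen)
-- ===== Notes on version B (the rewrite author's own statement) =====
-- stated objective: faster
-- what changed: B maintains the sum of consecutive squares incrementally as a running variable (adding one square per inner step) instead of re-summing the whole range each iteration, and deduplicates with a set instead of a linear 'z not in results' scan over the growing result list, then sorts once at the end.
import Mathlib
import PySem

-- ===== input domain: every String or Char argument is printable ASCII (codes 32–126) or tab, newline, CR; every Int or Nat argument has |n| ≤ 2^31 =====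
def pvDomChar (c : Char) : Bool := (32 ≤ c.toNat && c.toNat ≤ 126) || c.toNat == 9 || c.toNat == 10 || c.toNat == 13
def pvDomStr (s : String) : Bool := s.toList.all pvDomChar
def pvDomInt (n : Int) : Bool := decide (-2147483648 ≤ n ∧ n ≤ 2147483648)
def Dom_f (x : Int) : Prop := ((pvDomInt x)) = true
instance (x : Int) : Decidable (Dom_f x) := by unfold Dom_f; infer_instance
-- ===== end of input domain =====

-- B replaces A's O(max) inner re-summation and O(result) list-membership scan with an
-- incrementally maintained running sum and a set, O(max^2) instead of O(max^3).

-- ===== PORT A =====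
-- math.floor(math.sqrt(x)) is ported as the integer square root: exact on the admitted
-- domain 0 ≤ x ≤ 2^31 (< 2^52, where floor of the correctly-rounded float sqrt equals isqrt).
def f (x : Int) : List Int :=
  let max : Int := (Nat.sqrt x.toNat : Int)
  let results : List Int :=
    (PySem.List.pyRange 1 max 1).foldl (fun results i =>
      (PySem.List.pyRange (i + 2) max 1).foldl (fun results j =>
        let z : Int := ((PySem.List.pyRange i j 1).map (fun y => y * y)).sum
        if 1 < z ∧ z < x ∧ z ∉ results then results ++ [z] else results) results) []
  PySem.List.sorted results (fun v => v) false

-- ===== PORT B =====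
-- math.isqrt(x) ported as the integer square root (exact).
def f_alt (x : Int) : List Int :=
  let m : Int := (Nat.sqrt x.toNat : Int)
  let seen : PySem.Set Int :=
    (PySem.List.pyRange 1 m 1).foldl (fun seen i =>
      ((PySem.List.pyRange (i + 2) m 1).foldl
        (fun (p : PySem.Set Int × Int) j =>
          (if 1 < p.2 ∧ p.2 < x then PySem.Set.add p.1 p.2 else p.1, p.2 + j * j))
        (seen, i * i + (i + 1) * (i + 1))).1) PySem.Set.empty
  PySem.List.sorted seen (fun v => v) false

-- ===== PRECONDITION & SPEC =====
-- Pre_: for x < 0 both math.sqrt (in A) and math.isqrt (in B) raise ValueError.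
def Pre_f (x : Int) : Prop := 0 ≤ x
instance (x : Int) : Decidable (Pre_f x) := by unfold Pre_f; infer_instance

def pvWitness_f : Int := (150)

def Spec_f (x : Int) (out : List Int) : Prop := out = f_alt x
instance (x : Int) (out : List Int) : Decidable (Spec_f x out) := by unfold Spec_f; infer_instance

-- ===== CLAIM (what is proved, stated in full; the proofs are below) =====
def Claim_equal_f : Prop := ∀ (x : Int), Dom_f x → Pre_f x → Spec_f x (f x)

-- ===== LEMMAS AND PROOFS =====

-- one body step: B's guarded Set.add equals A's membership-guarded append
theorem step_eq (x z : Int) (s : List Int) :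
    (if 1 < z ∧ z < x then PySem.Set.add s z else s)
      = if 1 < z ∧ z < x ∧ z ∉ s then s ++ [z] else s := by
  by_cases h1 : 1 < z ∧ z < x
  · by_cases h2 : z ∈ s <;>
      simp [h1, h2, PySem.Set.add, PySem.Set.contains]
  · simp only [if_neg h1]
    rw [if_neg (by tauto)]

-- running-sum invariant: B's inner fold (carrying the running sum z) computes A's inner fold
theorem inner_eq (x hi i : Int) : ∀ (n : Nat) (lo : Int), (hi - lo).toNat = n → i ≤ lo →
    ∀ (s : List Int) (z : Int), z = ((PySem.List.pyRange i lo 1).map (fun y => y * y)).sum →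
    ((PySem.List.pyRange lo hi 1).foldl
        (fun (p : PySem.Set Int × Int) j =>
          (if 1 < p.2 ∧ p.2 < x then PySem.Set.add p.1 p.2 else p.1, p.2 + j * j)) (s, z)).1
      = (PySem.List.pyRange lo hi 1).foldl (fun results j =>
          let z : Int := ((PySem.List.pyRange i j 1).map (fun y => y * y)).sum
          if 1 < z ∧ z < x ∧ z ∉ results then results ++ [z] else results) s := by
  intro n
  induction n with
  | zero =>
    intro lo hn _ s z _
    rw [PySem.List.pyRange_one_eq_nil (by omega)]
    rfl
  | succ n ih =>
    intro lo hn hle s z hz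
    have hlt : lo < hi := by omega
    rw [PySem.List.pyRange_one_cons hlt]
    simp only [List.foldl_cons]
    rw [ih (lo + 1) (by omega) (by omega)
        (if 1 < z ∧ z < x then PySem.Set.add s z else s) (z + lo * lo)
        (by rw [PySem.List.pyRange_one_succ_right hle]; simp [hz])]
    rw [step_eq, ← hz]

theorem f_eq_f_alt (x : Int) (_hx : 0 ≤ x) : f x = f_alt x := by
  unfold f f_alt
  dsimp only
  congr 1
  apply PySem.List.foldl_congr_mem
  intro s i _
  exact (inner_eq x (Nat.sqrt x.toNat : Int) i _ (i + 2) rfl (by omega) s _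
    (by rw [show i + 2 = (i + 1) + 1 by ring,
            PySem.List.pyRange_one_succ_right (by omega : i ≤ i + 1),
            PySem.List.pyRange_one_singleton]; simp)).symm

-- ===== VERDICT (by name: the statement is the Claim_ definition above) =====
theorem f_spec : Claim_equal_f := by
  intro x _ hpre
  unfold Spec_f
  exact f_eq_f_alt x hpre
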